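-- pv_equiv track=rewrite | github.com/gahjelle/advent_of_code | 2016/20_firewall_rules/aoc20.py | count_allowed
-- ===== SOURCE A (Python) =====
-- def count_allowed(blacklist):
--     count = 0
--     lowest = 0
--
--     for first, last in blacklist:
--         if first > lowest:
--             count += first - lowest
--         if last >= lowest:
--             lowest = last + 1
--
--     return count, lowest - 1   # Does not account for any IPs at the end of the interval
-- ===== SOURCE B (Python) =====
-- def count_allowed(blacklist):
--     # Divide-and-conquer over index ranges: a half-range is summarised by the
--     # pair (IPs counted inside it, resulting lowest); halves are combined by
--     # threading the left half's resulting lowest into the right half.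
--     def go(lo, hi, lowest):
--         if hi - lo == 0:
--             return 0, lowest
--         if hi - lo == 1:
--             first, last = blacklist[lo]
--             gap = first - lowest if first > lowest else 0
--             return gap, max(lowest, last + 1)
--         mid = (lo + hi) // 2
--         c1, l1 = go(lo, mid, lowest)
--         c2, l2 = go(mid, hi, l1)
--         return c1 + c2, l2
--
--     count, lowest = go(0, len(blacklist), 0)
--     return count, lowest - 1
-- ===== Notes on version B (the rewrite author's own statement) =====
-- stated objective: alternative
-- what changed: Replaces the single linear stateful loop over (count, lowest) with a divide-and-conquer recursion over index ranges: each half-range yields a (count, resulting lowest) summary and halves are combined by threading the left summary's lowest into the right half.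
import Mathlib
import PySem

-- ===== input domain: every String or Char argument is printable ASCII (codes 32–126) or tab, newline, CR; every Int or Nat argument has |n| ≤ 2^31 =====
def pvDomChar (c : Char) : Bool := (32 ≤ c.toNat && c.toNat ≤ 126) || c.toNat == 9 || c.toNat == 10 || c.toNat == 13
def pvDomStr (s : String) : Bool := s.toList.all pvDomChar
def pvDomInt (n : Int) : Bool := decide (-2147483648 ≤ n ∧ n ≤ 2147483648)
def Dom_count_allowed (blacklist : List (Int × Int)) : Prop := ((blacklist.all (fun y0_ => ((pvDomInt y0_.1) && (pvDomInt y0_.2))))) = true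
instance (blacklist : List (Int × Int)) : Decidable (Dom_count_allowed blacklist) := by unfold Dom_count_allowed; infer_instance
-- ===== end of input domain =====

-- B replaces A's single linear stateful loop by a divide-and-conquer recursion over index
-- ranges, combining half-range summaries; same O(n) cost (objective: alternative).

-- ===== PORT A =====
-- literal transliteration of A's loop over (count, lowest)
def count_allowed (blacklist : List (Int × Int)) : Int × Int :=
  let st := blacklist.foldl
    (fun (s : Int × Int) (p : Int × Int) =>
      let count := if p.1 > s.2 then s.1 + (p.1 - s.2) else s.1
      let lowest := if p.2 ≥ s.2 then p.2 + 1 else s.2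
      (count, lowest))
    (0, 0)
  (st.1, st.2 - 1)

-- ===== PORT B =====
-- Source B's inner go(lo, hi, lowest); blacklist[lo] is always in range here, ported as getD.
-- The extra fuel argument (consumed once per recursive level) only makes the recursion
-- structural; fuel = blacklist.length always suffices since hi - lo shrinks at every call.
def pvGoDC (blacklist : List (Int × Int)) : Nat → Nat → Nat → Int → Int × Int
  | 0, _, _, lowest => (0, lowest)
  | fuel + 1, lo, hi, lowest =>
    if hi - lo = 0 then (0, lowest)
    else if hi - lo = 1 then
      let p := blacklist.getD lo (0, 0)
      let gap := if p.1 > lowest then p.1 - lowest else 0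
      (gap, max lowest (p.2 + 1))
    else
      let mid := (lo + hi) / 2
      let r1 := pvGoDC blacklist fuel lo mid lowest
      let r2 := pvGoDC blacklist fuel mid hi r1.2
      (r1.1 + r2.1, r2.2)

def count_allowed_alt (blacklist : List (Int × Int)) : Int × Int :=
  let r := pvGoDC blacklist blacklist.length 0 blacklist.length 0
  (r.1, r.2 - 1)

-- ===== PRECONDITION & SPEC =====
def Spec_count_allowed (blacklist : List (Int × Int)) (out : Int × Int) : Prop := out = count_allowed_alt blacklist
instance (blacklist : List (Int × Int)) (out : Int × Int) : Decidable (Spec_count_allowed blacklist out) := by unfold Spec_count_allowed; infer_instance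

-- ===== CLAIM (what is proved, stated in full; the proofs are below) =====
def Claim_equal_count_allowed : Prop := ∀ (blacklist : List (Int × Int)), Dom_count_allowed blacklist → Spec_count_allowed blacklist (count_allowed blacklist)

-- ===== LEMMAS AND PROOFS =====

-- reference recursion: (count contributed, final lowest) starting from lowest = l
def pvGo : List (Int × Int) → Int → Int × Int
  | [], l => (0, l)
  | p :: xs, l =>
      let c := if p.1 > l then p.1 - l else 0
      let r := pvGo xs (max l (p.2 + 1))
      (c + r.1, r.2)

theorem pvFoldA_go (xs : List (Int × Int)) : ∀ (c l : Int),
    xs.foldl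
      (fun (s : Int × Int) (p : Int × Int) =>
        let count := if p.1 > s.2 then s.1 + (p.1 - s.2) else s.1
        let lowest := if p.2 ≥ s.2 then p.2 + 1 else s.2
        (count, lowest))
      (c, l) = (c + (pvGo xs l).1, (pvGo xs l).2) := by
  induction xs with
  | nil => intro c l; simp [pvGo]
  | cons p xs ih =>
    intro c l
    simp only [List.foldl_cons, pvGo]
    have hmax : (if p.2 ≥ l then p.2 + 1 else l) = max l (p.2 + 1) := by
      split_ifs <;> omega
    rw [hmax, ih]
    by_cases h : p.1 > l <;> simp [h] <;> ring_nf

theorem pvGo_append (xs ys : List (Int × Int)) : ∀ (l : Int),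
    pvGo (xs ++ ys) l
      = ((pvGo xs l).1 + (pvGo ys (pvGo xs l).2).1, (pvGo ys (pvGo xs l).2).2) := by
  induction xs with
  | nil => intro l; simp [pvGo]
  | cons p xs ih =>
    intro l
    simp only [List.cons_append, pvGo, ih]
    ring_nf

-- pvGoDC computes pvGo on the slice [lo, hi) whenever it has enough fuel
theorem pvGoDC_go (bl : List (Int × Int)) : ∀ (fuel : Nat), ∀ (lo hi : Nat) (l : Int),
    hi - lo ≤ fuel → lo ≤ hi → hi ≤ bl.length →
    pvGoDC bl fuel lo hi l = pvGo ((bl.drop lo).take (hi - lo)) l := by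
  intro fuel
  induction fuel with
  | zero =>
    intro lo hi l hfuel _ _
    have h0 : hi - lo = 0 := by omega
    simp [pvGoDC, h0, pvGo]
  | succ fuel ih =>
    intro lo hi l hfuel hlohi hhi
    rw [pvGoDC]
    by_cases h0 : hi - lo = 0
    · simp [h0, pvGo]
    · by_cases h1 : hi - lo = 1
      · have hlt : lo < bl.length := by omega
        have hget : bl.getD lo (0, 0) = bl[lo] := by
          simp [List.getD, List.getElem?_eq_getElem hlt]
        have htake : (bl.drop lo).take (hi - lo) = [bl[lo]] := by
          rw [h1]
          rw [List.take_one, List.head?_drop, List.getElem?_eq_getElem hlt]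
          simp
        rw [htake]; simp [h1, pvGo, List.getElem?_eq_getElem hlt]
      · have hmid1 : lo < (lo + hi) / 2 := by omega
        have hmid2 : (lo + hi) / 2 < hi := by omega
        have hA := ih lo ((lo + hi) / 2) l (by omega) (by omega) (by omega)
        have hB := ih ((lo + hi) / 2) hi (pvGoDC bl fuel lo ((lo + hi) / 2) l).2
          (by omega) (by omega) hhi
        simp only [h0, h1, if_false]
        rw [hB, hA]
        have hsplit : (bl.drop lo).take (hi - lo)
            = (bl.drop lo).take ((lo + hi) / 2 - lo)
              ++ (bl.drop ((lo + hi) / 2)).take (hi - (lo + hi) / 2) := by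
          have hab : hi - lo = ((lo + hi) / 2 - lo) + (hi - (lo + hi) / 2) := by omega
          rw [hab, List.take_add, List.drop_drop]
          have hmidlo : lo + ((lo + hi) / 2 - lo) = (lo + hi) / 2 := by omega
          rw [hmidlo]
        rw [hsplit, pvGo_append]

-- ===== VERDICT (by name: the statement is the Claim_ definition above) =====
theorem count_allowed_spec : Claim_equal_count_allowed := by
  intro xs _
  unfold Spec_count_allowed count_allowed count_allowed_alt
  rw [pvGoDC_go xs xs.length 0 xs.length 0 (by omega) (Nat.zero_le _) le_rfl]
  simp [pvFoldA_go xs 0 0]
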